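-- pv_equiv track=rewrite | github.com/haidfs/LeetCode | Hot100/柱状图中的最大矩形84.py | largestRectangleArea3
-- ===== SOURCE A (Python) =====
-- def largestRectangleArea3(heights: [int]) -> int:
--     if not heights:
--         return 0
--     rows = max(heights)
--     cols = len(heights)
--     max_area = 0
--     dp = matrix = [[0] * cols for _ in range(rows)]
--     col_list = list(range(cols))
--     for height, col in zip(heights, col_list):
--         for i in range(rows - 1, rows - 1 - height, -1):
--             matrix[i][col] = 1
--     for i in range(rows):
--         for j in range(cols):
--             if matrix[i][j] == 0:
--                 continue
--             width = dp[i][j] = dp[i][j - 1] + 1 if j else 1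
--             for k in range(i, -1, -1):
--                 width = min(width, dp[k][j])
--                 max_area = max(max_area, width * (i - k + 1))
--     return max_area
-- ===== SOURCE B (Python) =====
-- def largestRectangleArea3(heights: [int]) -> int:
--     # Brute force over all segments with a running minimum: O(n^2), independent
--     # of the magnitude of the bar heights (A builds a max(h) x n matrix).
--     n = len(heights)
--     best = 0
--     for l in range(n):
--         m = heights[l]
--         for r in range(l, n):
--             if heights[r] < m:
--                 m = heights[r]
--             best = max(best, m * (r - l + 1))
--     return best
-- ===== Notes on version B (the rewrite author's own statement) =====
-- stated objective: faster
-- what changed: A rasterises the histogram into a max(heights) x n 0/1 matrix and runs the maximal-rectangle run-length DP over it; B drops the matrix entirely and scans all segments once with a running minimum, so its cost is independent of the magnitude of the bar heights.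
import Mathlib
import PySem

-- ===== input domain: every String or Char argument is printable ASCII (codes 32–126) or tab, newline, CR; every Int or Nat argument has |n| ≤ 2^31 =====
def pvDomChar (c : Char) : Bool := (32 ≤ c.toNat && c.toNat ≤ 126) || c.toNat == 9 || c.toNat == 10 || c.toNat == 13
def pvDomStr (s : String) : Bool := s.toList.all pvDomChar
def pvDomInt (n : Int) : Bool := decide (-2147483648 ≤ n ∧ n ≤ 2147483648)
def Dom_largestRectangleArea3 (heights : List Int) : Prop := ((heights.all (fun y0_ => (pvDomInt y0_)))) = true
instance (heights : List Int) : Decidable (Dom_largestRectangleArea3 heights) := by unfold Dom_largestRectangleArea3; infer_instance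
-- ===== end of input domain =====

-- B replaces A's max(h)×n binary-matrix DP by a direct running-minimum scan over all
-- segments (objective: faster — B's cost does not depend on the magnitude of the heights).

-- ===== PORT A =====
-- matrix cell read/write (all accesses A makes are in range)
def mget (m : List (List Int)) (i j : Nat) : Int := (m.getD i []).getD j 0
def mset (m : List (List Int)) (i j : Nat) (v : Int) : List (List Int) :=
  m.set i ((m.getD i []).set j v)

def largestRectangleArea3 (heights : List Int) : Int :=
  if heights = [] then 0 else
  let rows : Int := (PySem.List.max? heights (fun x => x)).getD 0  -- max(heights), list nonempty
  let cols : Nat := heights.length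
  -- dp = matrix = [[0] * cols for _ in range(rows)]  (dp and matrix alias the SAME object)
  let matrix0 : List (List Int) := (List.range rows.toNat).map (fun _ => List.replicate cols 0)
  -- for height, col in zip(heights, col_list): for i in range(rows-1, rows-1-height, -1): matrix[i][col] = 1
  let matrix : List (List Int) := heights.zipIdx.foldl (fun m hc =>
      (PySem.List.pyRange (rows - 1) (rows - 1 - hc.1) (-1)).foldl
        (fun m i => mset m i.toNat hc.2 1) m) matrix0
  -- main double loop, threading the (aliased) matrix and max_area
  let st := (List.range rows.toNat).foldl (fun (st : List (List Int) × Int) i =>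
      (List.range cols).foldl (fun (st : List (List Int) × Int) j =>
        if mget st.1 i j = 0 then st
        else
          let width : Int := if j ≠ 0 then mget st.1 i (j - 1) + 1 else 1
          let m := mset st.1 i j width
          -- for k in range(i, -1, -1): width = min(width, dp[k][j]); max_area = max(max_area, width*(i-k+1))
          let wb := ((List.range (i + 1)).reverse).foldl
            (fun (wb : Int × Int) k =>
              let w := min wb.1 (mget m k j)
              (w, max wb.2 (w * ((i : Int) - (k : Int) + 1)))) (width, st.2)
          (m, wb.2)) st) (matrix, 0)
  st.2

-- ===== PORT B =====
def largestRectangleArea3_alt (heights : List Int) : Int :=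
  let n := heights.length
  (List.range n).foldl (fun best l =>
    ((List.range' l (n - l)).foldl (fun (p : Int × Int) r =>
        let m := if heights.getD r 0 < p.1 then heights.getD r 0 else p.1
        (m, max p.2 (m * ((r : Int) - (l : Int) + 1)))) (heights.getD l 0, best)).2) 0

-- ===== PRECONDITION & SPEC =====
def Spec_largestRectangleArea3 (heights : List Int) (out : Int) : Prop := out = largestRectangleArea3_alt heights
instance (heights : List Int) (out : Int) : Decidable (Spec_largestRectangleArea3 heights out) := by unfold Spec_largestRectangleArea3; infer_instance

-- ===== CLAIM (what is proved, stated in full; the proofs are below) =====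
def Claim_equal_largestRectangleArea3 : Prop := ∀ (heights : List Int), Dom_largestRectangleArea3 heights → Spec_largestRectangleArea3 heights (largestRectangleArea3 heights)

-- ===== LEMMAS AND PROOFS =====

-- value of bar c (all reads in range)
def hv (h : List Int) (c : Nat) : Int := h.getD c 0
-- the 0/1 matrix entry A's fill phase produces at row i, column c
def oneI (h : List Int) (rows : Int) (i c : Nat) : Int := if rows - (i : Int) ≤ hv h c then 1 else 0
-- the run-length dp value A's sweep stores at row i, column c
def runv (h : List Int) (rows : Int) (i : Nat) : Nat → Int
  | 0 => if rows - (i : Int) ≤ hv h 0 then 1 else 0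
  | c + 1 => if rows - (i : Int) ≤ hv h (c + 1) then runv h rows i c + 1 else 0

-- minimum of f over [t, k] (f t alone if k ≤ t)
def segMin (f : Nat → Int) (t k : Nat) : Int :=
  if _h : t < k then min (f t) (segMin f (t + 1) k) else f t
termination_by k - t

def candA (h : List Int) (rows : Int) (i c t : Nat) : Int :=
  segMin (fun s => runv h rows s c) t i * ((i : Int) - (t : Int) + 1)
def candB (h : List Int) (l r : Nat) : Int :=
  segMin (hv h) l r * ((r : Int) - (l : Int) + 1)
def LA (h : List Int) (rows : Int) : List Int :=
  (List.range rows.toNat).flatMap (fun i =>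
    (List.range h.length).flatMap (fun c =>
      if oneI h rows i c = 0 then []
      else ((List.range (i + 1)).reverse).map (fun t => candA h rows i c t)))
def LB (h : List Int) : List Int :=
  (List.range h.length).flatMap (fun l =>
    (List.range' l (h.length - l)).map (fun r => candB h l r))

theorem segMin_eq_of_not_lt (f : Nat → Int) {t k : Nat} (h : ¬ t < k) : segMin f t k = f t := by
  rw [segMin]; simp [h]

theorem segMin_self (f : Nat → Int) (t : Nat) : segMin f t t = f t :=
  segMin_eq_of_not_lt f (lt_irrefl t)

theorem segMin_bot (f : Nat → Int) {t k : Nat} (h : t < k) :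
    segMin f t k = min (f t) (segMin f (t + 1) k) := by
  rw [segMin]; simp [h]

theorem segMin_top (f : Nat → Int) : ∀ d t k, k - t = d → t ≤ k →
    segMin f t (k + 1) = min (segMin f t k) (f (k + 1)) := by
  intro d
  induction d with
  | zero =>
    intro t k hd h
    have : t = k := by omega
    subst this
    rw [segMin_bot f (by omega), segMin_self, segMin_self]
  | succ d ih =>
    intro t k hd h
    have htk : t < k := by omega
    rw [segMin_bot f (by omega : t < k + 1), segMin_bot f htk,
      ih (t + 1) k (by omega) (by omega), min_assoc]

theorem segMin_le (f : Nat → Int) : ∀ d t r k, k - t = d → t ≤ r → r ≤ k → segMin f t k ≤ f r := by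
  intro d
  induction d with
  | zero =>
    intro t r k hd h1 h2
    have hk : k = t := by omega
    have hr : r = t := by omega
    subst hk; subst hr
    rw [segMin_self]
  | succ d ih =>
    intro t r k hd h1 h2
    rw [segMin_bot f (by omega)]
    rcases Nat.eq_or_lt_of_le h1 with h | h
    · subst h; exact min_le_left _ _
    · exact le_trans (min_le_right _ _) (ih (t + 1) r k (by omega) (by omega) h2)

theorem le_segMin (f : Nat → Int) {a : Int} : ∀ d t k, k - t = d → t ≤ k →
    (∀ r, t ≤ r → r ≤ k → a ≤ f r) → a ≤ segMin f t k := by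
  intro d
  induction d with
  | zero =>
    intro t k hd htk hall
    rw [segMin_eq_of_not_lt f (by omega)]
    exact hall t le_rfl (by omega)
  | succ d ih =>
    intro t k hd htk hall
    rw [segMin_bot f (by omega)]
    exact le_min (hall t le_rfl (by omega))
      (ih (t + 1) k (by omega) (by omega) (fun r h1 h2 => hall r (by omega) h2))

theorem runv_nonneg (h : List Int) (rows : Int) (i : Nat) : ∀ c, 0 ≤ runv h rows i c := by
  intro c
  induction c with
  | zero => rw [runv]; split <;> omega
  | succ c ih => rw [runv]; split <;> omega

theorem runv_le (h : List Int) (rows : Int) (i : Nat) : ∀ c, runv h rows i c ≤ (c : Int) + 1 := by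
  intro c
  induction c with
  | zero => rw [runv]; split <;> omega
  | succ c ih => rw [runv]; split <;> [push_cast ; skip] <;> omega

theorem runv_mem (h : List Int) (rows : Int) (i : Nat) :
    ∀ c (d : Nat), (d : Int) < runv h rows i c → rows - (i : Int) ≤ hv h (c - d) := by
  intro c
  induction c with
  | zero =>
    intro d hd
    rw [runv] at hd
    split at hd
    · have : d = 0 := by omega
      subst this; simpa using ‹rows - (i : Int) ≤ hv h 0›
    · omega
  | succ c ih =>
    intro d hd
    rw [runv] at hd
    split at hd
    · match d with
      | 0 => simpa using ‹rows - (i : Int) ≤ hv h (c + 1)›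
      | d + 1 =>
        have := ih d (by push_cast at hd ⊢; omega)
        simpa using this
    · omega

theorem runv_ge (h : List Int) (rows : Int) (i : Nat) :
    ∀ r l, l ≤ r → (∀ c, l ≤ c → c ≤ r → rows - (i : Int) ≤ hv h c) →
    ((r : Int) - (l : Int) + 1) ≤ runv h rows i r := by
  intro r
  induction r with
  | zero =>
    intro l hl hall
    have : l = 0 := by omega
    subst this
    rw [runv]
    rw [if_pos (hall 0 le_rfl le_rfl)]
    simp
  | succ r ih =>
    intro l hl hall
    rw [runv, if_pos (hall (r + 1) hl le_rfl)]
    rcases Nat.eq_or_lt_of_le hl with h' | h'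
    · have := runv_nonneg h rows i r
      omega
    · have := ih l (by omega) (fun c h1 h2 => hall c h1 (by omega))
      omega

-- generic max-fold facts
theorem foldl_max_le_iff (xs : List Int) : ∀ (a c : Int),
    xs.foldl max a ≤ c ↔ a ≤ c ∧ ∀ x ∈ xs, x ≤ c := by
  induction xs with
  | nil => simp
  | cons y t ih =>
    intro a c
    simp only [List.foldl_cons, ih, List.mem_cons]
    constructor
    · rintro ⟨h1, h2⟩
      exact ⟨le_trans (le_max_left _ _) h1,
        fun x hx => hx.elim (fun e => e ▸ le_trans (le_max_right _ _) h1) (h2 x)⟩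
    · rintro ⟨h1, h2⟩
      exact ⟨max_le h1 (h2 y (Or.inl rfl)), fun x hx => h2 x (Or.inr hx)⟩

theorem le_foldl_max_self (xs : List Int) (a : Int) : a ≤ xs.foldl max a :=
  ((foldl_max_le_iff xs a _).mp le_rfl).1

theorem mem_le_foldl_max (xs : List Int) (a : Int) {x : Int} (hx : x ∈ xs) : x ≤ xs.foldl max a :=
  ((foldl_max_le_iff xs a _).mp le_rfl).2 x hx

-- shapes and matrix lemmas
def Shape (m : List (List Int)) (R n : Nat) : Prop :=
  m.length = R ∧ ∀ r ∈ m, r.length = n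

theorem getD_set_self' {α : Type} (l : List α) (i : Nat) (a d : α) (hi : i < l.length) :
    (l.set i a).getD i d = a := by
  rw [List.getD_eq_getElem?_getD, List.getElem?_set_self hi]; rfl

theorem getD_set_ne' {α : Type} (l : List α) {i i' : Nat} (a d : α) (h : i ≠ i') :
    (l.set i' a).getD i d = l.getD i d := by
  rw [List.getD_eq_getElem?_getD, List.getElem?_set_ne (Ne.symm h), ← List.getD_eq_getElem?_getD]

theorem getD_mem_of_lt {m : List (List Int)} {i : Nat} (hi : i < m.length) :
    m.getD i [] ∈ m := by
  rw [List.getD_eq_getElem?_getD, List.getElem?_eq_getElem hi]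
  exact List.getElem_mem hi

theorem row_len {m : List (List Int)} {R n : Nat} (hs : Shape m R n) {i : Nat} (hi : i < R) :
    (m.getD i []).length = n := by
  have h1 := hs.1
  exact hs.2 _ (getD_mem_of_lt (by omega))

theorem shape_mset {m : List (List Int)} {R n : Nat} (hs : Shape m R n) (i j : Nat) (v : Int) :
    Shape (mset m i j v) R n := by
  unfold mset
  rcases Nat.lt_or_ge i m.length with hi | hi
  · refine ⟨by simpa using hs.1, ?_⟩
    intro r hr
    rcases List.mem_or_eq_of_mem_set hr with h | h
    · exact hs.2 r h
    · subst h
      simpa using hs.2 _ (getD_mem_of_lt hi)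
  · rw [List.set_eq_of_length_le (by simpa using hi)]
    exact hs

theorem mget_mset_same {m : List (List Int)} {R n : Nat} (hs : Shape m R n)
    {i j : Nat} (hi : i < R) (hj : j < n) (v : Int) : mget (mset m i j v) i j = v := by
  have h1 := hs.1
  have hi' : i < m.length := by omega
  have hj' : j < (m.getD i []).length := by rw [row_len hs hi]; omega
  unfold mget mset
  rw [getD_set_self' m i _ [] hi', getD_set_self' _ j v 0 (by simpa using hj')]

theorem mget_mset_ne {m : List (List Int)} {i j i' j' : Nat} (hne : i ≠ i' ∨ j ≠ j') (v : Int) :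
    mget (mset m i' j' v) i j = mget m i j := by
  unfold mget mset
  by_cases hii : i = i'
  · subst hii
    have hjj : j ≠ j' := hne.resolve_left (fun h => h rfl)
    rcases Nat.lt_or_ge i m.length with hi | hi
    · rw [getD_set_self' m i _ [] hi, getD_set_ne' _ v 0 hjj]
    · rw [List.set_eq_of_length_le (by simpa using hi)]
  · rw [getD_set_ne' m _ [] hii]

theorem foldl_congr_mem' {α β : Type} (l : List α) (f g : β → α → β) (b : β)
    (h : ∀ b x, x ∈ l → f b x = g b x) : l.foldl f b = l.foldl g b := by
  induction l generalizing b with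
  | nil => rfl
  | cons x t ih =>
    simp only [List.foldl_cons]
    rw [h b x (List.mem_cons_self), ih _ (fun b y hy => h b y (List.mem_cons_of_mem x hy))]

theorem getD_mem {α : Type} {l : List α} {i : Nat} (d : α) (hi : i < l.length) :
    l.getD i d ∈ l := by
  rw [List.getD_eq_getElem?_getD, List.getElem?_eq_getElem hi]
  exact List.getElem_mem hi

-- the pure shape of A's innermost k-loop
theorem kfold (g : Nat → Int) (i : Nat) : ∀ k, k ≤ i → ∀ (w a : Int),
    ((List.range (k + 1)).reverse).foldl
      (fun (wb : Int × Int) t =>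
        let w' := min wb.1 (g t)
        (w', max wb.2 (w' * ((i : Int) - (t : Int) + 1)))) (w, a)
    = (min w (segMin g 0 k),
       (((List.range (k + 1)).reverse).map
         (fun t => min w (segMin g t k) * ((i : Int) - (t : Int) + 1))).foldl max a) := by
  intro k
  induction k with
  | zero =>
    intro _ w a
    simp [segMin_self]
  | succ k ih =>
    intro hk w a
    have hrev : (List.range (k + 2)).reverse = (k + 1) :: (List.range (k + 1)).reverse := by
      rw [List.range_succ, List.reverse_append]; rfl
    rw [hrev]
    simp only [List.foldl_cons, List.map_cons]
    rw [ih (by omega)]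
    have htop0 := segMin_top g k 0 k (by omega) (by omega)
    congr 1
    · rw [htop0, min_assoc, min_comm (g (k + 1))]
    · congr 1
      · rw [segMin_self]
      · apply List.map_congr_left
        intro t ht
        have ht' : t ≤ k := by
          rw [List.mem_reverse, List.mem_range] at ht; omega
        rw [segMin_top g (k - t) t k (by omega) (by omega), min_assoc, min_comm (g (k + 1))]

-- one column-fill pass of A's first loop
theorem write1_spec {R n : Nat} (c : Nat) (hc : c < n) : ∀ (L : List Int) (m : List (List Int)),
    Shape m R n → (∀ x ∈ L, 0 ≤ x ∧ x.toNat < R) →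
    Shape (L.foldl (fun m i => mset m i.toNat c 1) m) R n ∧
    ∀ i, i < R → ∀ c', c' < n →
      mget (L.foldl (fun m i => mset m i.toNat c 1) m) i c' =
        if c' = c ∧ (i : Int) ∈ L then 1 else mget m i c' := by
  intro L
  induction L with
  | nil =>
    intro m hs _
    refine ⟨hs, fun i _ c' _ => ?_⟩
    simp
  | cons x t ih =>
    intro m hs hb
    have hx := hb x List.mem_cons_self
    have hs1 := shape_mset hs x.toNat c 1
    obtain ⟨hsh, hget⟩ := ih (mset m x.toNat c 1) hs1 (fun y hy => hb y (List.mem_cons_of_mem x hy))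
    refine ⟨hsh, fun i hi c' hc' => ?_⟩
    rw [List.foldl_cons, hget i hi c' hc']
    by_cases h1 : c' = c
    · subst h1
      by_cases h2 : (i : Int) ∈ t
      · rw [if_pos ⟨rfl, h2⟩, if_pos ⟨rfl, List.mem_cons_of_mem x h2⟩]
      · by_cases h3 : (i : Int) = x
        · have hix : i = x.toNat := by omega
          subst hix
          rw [if_neg (fun hh => h2 hh.2), mget_mset_same hs hi hc',
            if_pos ⟨rfl, by rw [List.mem_cons]; exact Or.inl h3⟩]
        · have hne : i ≠ x.toNat := by omega
          rw [if_neg (fun hh => h2 hh.2), mget_mset_ne (Or.inl hne), if_neg ?_]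
          rintro ⟨-, hmem⟩
          rw [List.mem_cons] at hmem
          rcases hmem with hh | hh
          · exact h3 hh
          · exact h2 hh
    · rw [if_neg (fun hh => h1 hh.1), if_neg (fun hh => h1 hh.1), mget_mset_ne (Or.inr h1)]

-- A's fill loop: the matrix becomes the 0/1 histogram picture
theorem fill_go {R n : Nat} (rows : Int) (hR : R = rows.toNat) :
    ∀ (hs : List Int) (s : Nat) (m : List (List Int)), Shape m R n → s + hs.length ≤ n →
    (∀ x ∈ hs, x ≤ rows) →
    Shape ((hs.zipIdx s).foldl (fun m hc =>
        (PySem.List.pyRange (rows - 1) (rows - 1 - hc.1) (-1)).foldl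
          (fun m i => mset m i.toNat hc.2 1) m) m) R n ∧
    ∀ i, i < R → ∀ c, c < n →
      mget ((hs.zipIdx s).foldl (fun m hc =>
        (PySem.List.pyRange (rows - 1) (rows - 1 - hc.1) (-1)).foldl
          (fun m i => mset m i.toNat hc.2 1) m) m) i c =
        if s ≤ c ∧ c < s + hs.length ∧ rows - (i : Int) ≤ hs.getD (c - s) 0 then 1
        else mget m i c := by
  intro hs
  induction hs with
  | nil =>
    intro s m hsh _ _
    refine ⟨hsh, fun i _ c _ => ?_⟩
    simp only [List.zipIdx_nil, List.foldl_nil, List.length_nil]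
    rw [if_neg (by rintro ⟨h1, h2, -⟩; omega)]
  | cons x tl ih =>
    intro s m hsh hsn hub
    rw [List.zipIdx_cons, List.foldl_cons]
    have hxr : x ≤ rows := hub x List.mem_cons_self
    have hbnd : ∀ y ∈ PySem.List.pyRange (rows - 1) (rows - 1 - x) (-1), 0 ≤ y ∧ y.toNat < R := by
      intro y hy
      rw [PySem.List.mem_pyRange_neg_one] at hy
      constructor <;> omega
    obtain ⟨hsh1, hget1⟩ := write1_spec (R := R) (n := n) s (by simp at hsn; omega)
      (PySem.List.pyRange (rows - 1) (rows - 1 - x) (-1)) m hsh hbnd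
    obtain ⟨hsh2, hget2⟩ := ih (s + 1) _ hsh1 (by simp at hsn ⊢; omega)
      (fun y hy => hub y (List.mem_cons_of_mem x hy))
    refine ⟨hsh2, fun i hi c hc => ?_⟩
    rw [hget2 i hi c hc, hget1 i hi c hc]
    have hmem : ((i : Int) ∈ PySem.List.pyRange (rows - 1) (rows - 1 - x) (-1)) ↔
        rows - (i : Int) ≤ x := by
      rw [PySem.List.mem_pyRange_neg_one]; omega
    by_cases h1 : c = s
    · subst h1
      rw [if_neg (by rintro ⟨hh, -, -⟩; omega)]
      simp only [Nat.sub_self, List.getD_cons_zero, List.length_cons]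
      by_cases h2 : rows - (i : Int) ≤ x
      · rw [if_pos ⟨trivial, hmem.mpr h2⟩, if_pos ⟨le_rfl, by omega, h2⟩]
      · rw [if_neg (fun hh => h2 (hmem.mp hh.2)), if_neg (fun hh => h2 hh.2.2)]
    · by_cases h2 : s + 1 ≤ c ∧ c < s + 1 + tl.length ∧ rows - (i : Int) ≤ tl.getD (c - (s + 1)) 0
      · obtain ⟨ha, hb', hc'⟩ := h2
        have hcs : c - s = (c - (s + 1)) + 1 := by omega
        rw [if_pos ⟨ha, hb', hc'⟩,
          if_pos ⟨by omega, by simp only [List.length_cons]; omega,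
            by rw [hcs, List.getD_cons_succ]; exact hc'⟩]
      · have h3 : ¬ (s ≤ c ∧ c < s + (x :: tl).length ∧
            rows - (i : Int) ≤ (x :: tl).getD (c - s) 0) := by
          rintro ⟨ha, hb', hc'⟩
          apply h2
          have hcs : c - s = (c - (s + 1)) + 1 := by omega
          rw [hcs, List.getD_cons_succ] at hc'
          exact ⟨by omega, by simp only [List.length_cons] at hb'; omega, hc'⟩
        rw [if_neg h2, if_neg (fun hh => h1 hh.1), if_neg h3]

def InvM (h : List Int) (rows : Int) (R n p q : Nat) (m : List (List Int)) : Prop :=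
  Shape m R n ∧ ∀ i, i < R → ∀ c, c < n →
    mget m i c = if i < p ∨ (i = p ∧ c < q) then runv h rows i c else oneI h rows i c

theorem runv_eq_zero {h : List Int} {rows : Int} {i c : Nat} (h0 : oneI h rows i c = 0) :
    runv h rows i c = 0 := by
  unfold oneI at h0
  split at h0
  · omega
  · cases c <;> rw [runv] <;> rw [if_neg ‹¬ _›]

theorem runv_succ_col {h : List Int} {rows : Int} {i c : Nat} (h1 : oneI h rows i c = 1) :
    runv h rows i c = (if c ≠ 0 then runv h rows i (c - 1) + 1 else 1) := by
  unfold oneI at h1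
  split at h1
  · cases c with
    | zero => rw [runv, if_pos ‹_›]; simp
    | succ c => rw [runv, if_pos ‹_›]; simp
  · omega

theorem oneI_cases (h : List Int) (rows : Int) (i c : Nat) :
    oneI h rows i c = 0 ∨ oneI h rows i c = 1 := by
  unfold oneI; split
  · exact Or.inr rfl
  · exact Or.inl rfl

-- one row of A's main double loop
theorem rowfold (h : List Int) (rows : Int) (R n : Nat) (hR : R = rows.toNat) (p : Nat)
    (hp : p < R) : ∀ q, q ≤ n → ∀ (m : List (List Int)) (a : Int), InvM h rows R n p 0 m →
    ∃ m', (List.range q).foldl (fun (st : List (List Int) × Int) j =>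
        if mget st.1 p j = 0 then st
        else
          let width : Int := if j ≠ 0 then mget st.1 p (j - 1) + 1 else 1
          let m := mset st.1 p j width
          let wb := ((List.range (p + 1)).reverse).foldl
            (fun (wb : Int × Int) k =>
              let w := min wb.1 (mget m k j)
              (w, max wb.2 (w * ((p : Int) - (k : Int) + 1)))) (width, st.2)
          (m, wb.2)) (m, a)
      = (m', ((List.range q).flatMap (fun c => if oneI h rows p c = 0 then []
          else ((List.range (p + 1)).reverse).map (fun t => candA h rows p c t))).foldl max a)
      ∧ InvM h rows R n p q m' := by
  intro q
  induction q with
  | zero =>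
    intro _ m a hInv
    exact ⟨m, rfl, hInv⟩
  | succ q ih =>
    intro hq m a hInv
    obtain ⟨m', heq, hInv'⟩ := ih (by omega) m a hInv
    rw [show List.range (q + 1) = List.range q ++ [q] from List.range_succ,
      List.foldl_append, heq, List.flatMap_append, List.foldl_append]
    simp only [List.foldl_cons, List.foldl_nil, List.flatMap_cons, List.flatMap_nil,
      List.append_nil]
    have hqn : q < n := by omega
    have hread : mget m' p q = oneI h rows p q := by
      rw [hInv'.2 p hp q hqn, if_neg (by omega)]
    rcases oneI_cases h rows p q with h0 | h1
    · rw [if_pos (by rw [hread, h0]), h0]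
      refine ⟨m', rfl, hInv'.1, fun i hi c hc => ?_⟩
      rw [hInv'.2 i hi c hc]
      by_cases hpc : i = p ∧ c = q
      · obtain ⟨rfl, rfl⟩ := hpc
        rw [if_neg (by omega), if_pos (by omega), h0, runv_eq_zero h0]
      · exact if_congr (by constructor <;> intro hh <;> omega) rfl rfl
    · have hg1 : ¬ (mget m' p q = 0) := by rw [hread, h1]; omega
      have hg2 : ¬ (oneI h rows p q = 0) := by rw [h1]; omega
      rw [if_neg hg1, if_neg hg2]
      have hw : (if q ≠ 0 then mget m' p (q - 1) + 1 else 1) = runv h rows p q := by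
        by_cases hq0 : q = 0
        · subst hq0
          rw [if_neg (by omega), runv_succ_col h1, if_neg (by omega)]
        · rw [if_pos hq0, hInv'.2 p hp (q - 1) (by omega), if_pos (by omega),
            runv_succ_col h1, if_pos hq0]
      rw [hw]
      set m2 := mset m' p q (runv h rows p q) with hm2
      have hInv2 : InvM h rows R n p (q + 1) m2 := by
        refine ⟨shape_mset hInv'.1 p q _, fun i hi c hc => ?_⟩
        by_cases hpc : i = p ∧ c = q
        · obtain ⟨rfl, rfl⟩ := hpc
          rw [hm2, mget_mset_same hInv'.1 hp hqn, if_pos (by omega)]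
        · have hne : i ≠ p ∨ c ≠ q := by tauto
          rw [hm2, mget_mset_ne hne, hInv'.2 i hi c hc]
          exact if_congr (by constructor <;> intro hh <;> omega) rfl rfl
      have hcong : ∀ (z : Int × Int),
          ((List.range (p + 1)).reverse).foldl
            (fun (wb : Int × Int) k =>
              (min wb.1 (mget m2 k q),
               max wb.2 (min wb.1 (mget m2 k q) * ((p : Int) - (k : Int) + 1)))) z
          = ((List.range (p + 1)).reverse).foldl
            (fun (wb : Int × Int) k =>
              let w := min wb.1 (runv h rows k q)
              (w, max wb.2 (w * ((p : Int) - (k : Int) + 1)))) z := by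
        intro z
        apply foldl_congr_mem'
        intro b k hk
        have hk' : k ≤ p := by rw [List.mem_reverse, List.mem_range] at hk; omega
        have hmg : mget m2 k q = runv h rows k q := by
          rw [hInv2.2 k (by omega) q hqn, if_pos (by omega)]
        simp only [hmg]
      rw [hcong, kfold (fun s => runv h rows s q) p p le_rfl]
      refine ⟨m2, ?_, hInv2⟩
      have hmap : List.map (fun t => min (runv h rows p q)
            (segMin (fun s => runv h rows s q) t p) * ((p : Int) - (t : Int) + 1))
            ((List.range (p + 1)).reverse)
          = List.map (fun t => candA h rows p q t) ((List.range (p + 1)).reverse) := by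
        apply List.map_congr_left
        intro t ht
        have ht' : t ≤ p := by rw [List.mem_reverse, List.mem_range] at ht; omega
        unfold candA
        rw [min_eq_right (segMin_le (fun s => runv h rows s q) (p - t) t p p (by omega) ht' le_rfl)]
      rw [hmap]

-- the whole main double loop
theorem outerfold (h : List Int) (rows : Int) (R n : Nat) (hR : R = rows.toNat) :
    ∀ p, p ≤ R → ∀ (m : List (List Int)), InvM h rows R n 0 0 m →
    ∃ m', (List.range p).foldl (fun (st : List (List Int) × Int) i =>
        (List.range n).foldl (fun (st : List (List Int) × Int) j =>
          if mget st.1 i j = 0 then st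
          else
            let width : Int := if j ≠ 0 then mget st.1 i (j - 1) + 1 else 1
            let m := mset st.1 i j width
            let wb := ((List.range (i + 1)).reverse).foldl
              (fun (wb : Int × Int) k =>
                let w := min wb.1 (mget m k j)
                (w, max wb.2 (w * ((i : Int) - (k : Int) + 1)))) (width, st.2)
            (m, wb.2)) st) (m, 0)
      = (m', ((List.range p).flatMap (fun i => (List.range n).flatMap (fun c =>
          if oneI h rows i c = 0 then []
          else ((List.range (i + 1)).reverse).map (fun t => candA h rows i c t)))).foldl max 0)
      ∧ InvM h rows R n p 0 m' := by
  intro p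
  induction p with
  | zero =>
    intro _ m hInv
    exact ⟨m, rfl, hInv⟩
  | succ p ih =>
    intro hp m hInv
    obtain ⟨m', heq, hInv'⟩ := ih (by omega) m hInv
    rw [List.range_succ, List.foldl_append, heq, List.flatMap_append, List.foldl_append]
    simp only [List.foldl_cons, List.foldl_nil, List.flatMap_cons, List.flatMap_nil,
      List.append_nil]
    obtain ⟨m2, heq2, hInv2⟩ := rowfold h rows R n hR p (by omega) n le_rfl m' _ hInv' 
    rw [heq2]
    refine ⟨m2, rfl, hInv2.1, fun i hi c hc => ?_⟩
    rw [hInv2.2 i hi c hc]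
    exact if_congr (by constructor <;> intro hh <;> omega) rfl rfl

theorem A_eq_LA (h : List Int) (hne : h ≠ []) :
    largestRectangleArea3 h = (LA h ((PySem.List.max? h (fun x => x)).getD 0)).foldl max 0 := by
  have hmax : ∃ mv, PySem.List.max? h (fun x => x) = some mv := by
    cases hm : PySem.List.max? h (fun x => x) with
    | none => exact absurd ((PySem.List.max?_eq_none_iff h (fun x => x)).mp hm) hne
    | some mv => exact ⟨mv, rfl⟩
  have hub : ∀ x ∈ h, x ≤ (PySem.List.max? h (fun x => x)).getD 0 := by
    obtain ⟨mv, hm⟩ := hmax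
    intro x hx
    have := PySem.List.max?_isMax hm x hx
    rw [hm]
    simpa using this
  simp only [largestRectangleArea3]
  rw [if_neg hne]
  set rows : Int := (PySem.List.max? h (fun x => x)).getD 0 with hrows
  set R : Nat := rows.toNat with hRdef
  set n : Nat := h.length with hndef
  have hshape0 : Shape ((List.range R).map (fun _ => List.replicate n (0 : Int))) R n := by
    constructor
    · simp
    · intro r hr
      simp only [List.mem_map] at hr
      obtain ⟨a, -, rfl⟩ := hr
      simp
  have hzero : ∀ i, i < R → ∀ c, c < n →
      mget ((List.range R).map (fun _ => List.replicate n (0 : Int))) i c = 0 := by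
    intro i hi c hc
    have e1 : (List.map (fun _ : Nat => List.replicate n (0 : Int)) (List.range R)).getD i []
        = List.replicate n 0 := by
      rw [List.getD_eq_getElem?_getD, List.getElem?_map, List.getElem?_range hi]
      rfl
    unfold mget
    rw [e1, List.getD_eq_getElem?_getD, List.getElem?_replicate]
    split <;> rfl
  obtain ⟨hsh1, hfill⟩ := fill_go (R := R) (n := n) rows hRdef h 0 _ hshape0 (by omega) hub
  have hInv0 : InvM h rows R n 0 0 (h.zipIdx.foldl (fun m hc =>
      (PySem.List.pyRange (rows - 1) (rows - 1 - hc.1) (-1)).foldl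
        (fun m i => mset m i.toNat hc.2 1) m)
      ((List.range R).map (fun _ => List.replicate n (0 : Int)))) := by
    refine ⟨hsh1, fun i hi c hc => ?_⟩
    rw [if_neg (show ¬ (i < 0 ∨ (i = 0 ∧ c < 0)) by omega)]
    rw [hfill i hi c hc, hzero i hi c hc]
    unfold oneI hv
    refine if_congr ?_ rfl rfl
    constructor
    · rintro ⟨-, -, hh⟩; simpa using hh
    · intro hh; exact ⟨by omega, by omega, by simpa using hh⟩
  obtain ⟨mf, heq, -⟩ := outerfold h rows R n hRdef R le_rfl _ hInv0
  rw [heq]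
  rfl

theorem B_inner (h : List Int) (l : Nat) : ∀ (s : Nat) (a : Int),
    (List.range' l (s + 1)).foldl (fun (p : Int × Int) r =>
        let m := if h.getD r 0 < p.1 then h.getD r 0 else p.1
        (m, max p.2 (m * ((r : Int) - (l : Int) + 1)))) (h.getD l 0, a)
    = (segMin (hv h) l (l + s),
       ((List.range' l (s + 1)).map (fun r => candB h l r)).foldl max a) := by
  intro s
  induction s with
  | zero =>
    intro a
    simp [segMin_self, candB, hv]
  | succ s ih =>
    intro a
    rw [List.range'_1_concat, List.foldl_append, ih, List.map_append, List.foldl_append]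
    simp only [List.foldl_cons, List.foldl_nil, List.map_cons, List.map_nil]
    have hm : (if h.getD (l + (s + 1)) 0 < segMin (hv h) l (l + s) then h.getD (l + (s + 1)) 0
        else segMin (hv h) l (l + s)) = segMin (hv h) l (l + (s + 1)) := by
      have htop := segMin_top (hv h) (l + s - l) l (l + s) (by omega) (by omega)
      have : l + s + 1 = l + (s + 1) := by omega
      rw [this] at htop
      rw [htop]
      rcases lt_or_ge (hv h (l + (s + 1))) (segMin (hv h) l (l + s)) with hlt | hge
      · rw [if_pos (by exact hlt), min_eq_right (le_of_lt hlt)]; rfl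
      · rw [if_neg (by exact not_lt.mpr hge), min_eq_left hge]
    rw [hm]
    rfl

theorem B_eq_LB (h : List Int) : largestRectangleArea3_alt h = (LB h).foldl max 0 := by
  unfold largestRectangleArea3_alt LB
  simp only []
  suffices H : ∀ p, p ≤ h.length →
      (List.range p).foldl (fun best l =>
        ((List.range' l (h.length - l)).foldl (fun (p : Int × Int) r =>
            let m := if h.getD r 0 < p.1 then h.getD r 0 else p.1
            (m, max p.2 (m * ((r : Int) - (l : Int) + 1)))) (h.getD l 0, best)).2) 0
      = ((List.range p).flatMap (fun l =>
          (List.range' l (h.length - l)).map (fun r => candB h l r))).foldl max 0 by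
    exact H h.length le_rfl
  intro p hp
  induction p with
  | zero => rfl
  | succ p ih =>
    rw [List.range_succ, List.foldl_append, List.flatMap_append, List.foldl_append,
      ih (by omega)]
    simp only [List.foldl_cons, List.foldl_nil, List.flatMap_cons, List.flatMap_nil,
      List.append_nil]
    have hlen : h.length - p = (h.length - p - 1) + 1 := by omega
    rw [hlen, B_inner h p (h.length - p - 1) _]

-- every candidate A considers is dominated by a segment candidate of B
theorem LA_dom (h : List Int) (rows : Int) :
    ∀ x ∈ LA h rows, x ≤ (LB h).foldl max 0 := by
  intro x hx
  unfold LA at hx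
  rw [List.mem_flatMap] at hx
  obtain ⟨i, hi, hx⟩ := hx
  rw [List.mem_range] at hi
  rw [List.mem_flatMap] at hx
  obtain ⟨c, hc, hx⟩ := hx
  rw [List.mem_range] at hc
  by_cases h1 : oneI h rows i c = 0
  · rw [if_pos h1] at hx
    simp at hx
  · rw [if_neg h1, List.mem_map] at hx
    obtain ⟨t, ht, rfl⟩ := hx
    rw [List.mem_reverse, List.mem_range] at ht
    have ht' : t ≤ i := by omega
    have hw0 : 0 ≤ segMin (fun s => runv h rows s c) t i :=
      le_segMin _ (i - t) t i (by omega) ht' (fun r _ _ => runv_nonneg h rows r c)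
    rcases (by omega : segMin (fun s => runv h rows s c) t i < 1 ∨ 1 ≤ segMin (fun s => runv h rows s c) t i) with hwlt | hwge
    · have hz : candA h rows i c t ≤ 0 := by
        unfold candA
        have : segMin (fun s => runv h rows s c) t i = 0 := by omega
        rw [this]
        simp
      exact le_trans hz (le_foldl_max_self _ 0)
    · have hwr : segMin (fun s => runv h rows s c) t i ≤ runv h rows t c :=
        segMin_le _ (i - t) t t i (by omega) le_rfl ht'
      have hrc : runv h rows t c ≤ (c : Int) + 1 := runv_le h rows t c
      have hwc : (segMin (fun s => runv h rows s c) t i).toNat ≤ c + 1 := by omega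
      have hseg : rows - (t : Int) ≤
          segMin (hv h) (c + 1 - (segMin (fun s => runv h rows s c) t i).toNat) c := by
        apply le_segMin (hv h) _ _ c rfl (by omega)
        intro r hr1 hr2
        have hd : ((c - r : Nat) : Int) < runv h rows t c := by omega
        have hm := runv_mem h rows t c (c - r) hd
        have hrr : c - (c - r) = r := by omega
        rwa [hrr] at hm
      have hmem : candB h (c + 1 - (segMin (fun s => runv h rows s c) t i).toNat) c ∈ LB h := by
        unfold LB
        rw [List.mem_flatMap]
        refine ⟨c + 1 - (segMin (fun s => runv h rows s c) t i).toNat,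
          by rw [List.mem_range]; omega, ?_⟩
        rw [List.mem_map]
        exact ⟨c, by rw [List.mem_range'_1]; omega, rfl⟩
      refine le_trans ?_ (mem_le_foldl_max _ 0 hmem)
      unfold candA candB
      have h1' : ((c : Int) - (c + 1 - (segMin (fun s => runv h rows s c) t i).toNat : Nat) + 1)
          = segMin (fun s => runv h rows s c) t i := by omega
      rw [h1']
      have h2' : (i : Int) - t + 1 ≤ rows - t := by omega
      calc segMin (fun s => runv h rows s c) t i * ((i : Int) - t + 1)
          ≤ segMin (fun s => runv h rows s c) t i *
            (segMin (hv h) (c + 1 - (segMin (fun s => runv h rows s c) t i).toNat) c) :=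
            mul_le_mul_of_nonneg_left (le_trans h2' hseg) hw0
        _ = segMin (hv h) (c + 1 - (segMin (fun s => runv h rows s c) t i).toNat) c *
            segMin (fun s => runv h rows s c) t i := mul_comm _ _

-- every segment candidate of B is dominated by a candidate of A
theorem LB_dom (h : List Int) (rows : Int)
    (hub : ∀ c, c < h.length → hv h c ≤ rows) :
    ∀ x ∈ LB h, x ≤ (LA h rows).foldl max 0 := by
  intro x hx
  unfold LB at hx
  rw [List.mem_flatMap] at hx
  obtain ⟨l, hl, hx⟩ := hx
  rw [List.mem_range] at hl
  rw [List.mem_map] at hx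
  obtain ⟨r, hr, rfl⟩ := hx
  rw [List.mem_range'_1] at hr
  obtain ⟨hlr, hrn⟩ := hr
  have hrn' : r < h.length := by omega
  rcases (by omega : segMin (hv h) l r ≤ 0 ∨ 0 < segMin (hv h) l r) with hM0 | hM1
  · have hz : candB h l r ≤ 0 := by
      unfold candB
      exact mul_nonpos_of_nonpos_of_nonneg hM0 (by omega)
    exact le_trans hz (le_foldl_max_self _ 0)
  · have hMr : segMin (hv h) l r ≤ hv h r := segMin_le _ (r - l) l r r (by omega) hlr le_rfl
    have hvr : hv h r ≤ rows := hub r hrn'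
    have hrows1 : 1 ≤ rows := by omega
    have hone : ¬ (oneI h rows (rows.toNat - 1) r = 0) := by
      unfold oneI
      rw [if_pos (by omega)]
      omega
    have hseg : (r : Int) - l + 1 ≤
        segMin (fun s => runv h rows s r) ((rows - segMin (hv h) l r).toNat) (rows.toNat - 1) := by
      apply le_segMin _ _ _ _ rfl (by omega)
      intro s hs1 hs2
      apply runv_ge h rows s r l hlr
      intro c' hc1 hc2
      have hMc : segMin (hv h) l r ≤ hv h c' := segMin_le _ (r - l) l c' r (by omega) hc1 hc2
      omega
    have hmem : candA h rows (rows.toNat - 1) r ((rows - segMin (hv h) l r).toNat) ∈ LA h rows := by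
      unfold LA
      rw [List.mem_flatMap]
      refine ⟨rows.toNat - 1, by rw [List.mem_range]; omega, ?_⟩
      rw [List.mem_flatMap]
      refine ⟨r, by rw [List.mem_range]; omega, ?_⟩
      rw [if_neg hone, List.mem_map]
      exact ⟨(rows - segMin (hv h) l r).toNat, by rw [List.mem_reverse, List.mem_range]; omega, rfl⟩
    refine le_trans ?_ (mem_le_foldl_max _ 0 hmem)
    unfold candA candB
    have h1' : ((rows.toNat - 1 : Nat) : Int) - ((rows - segMin (hv h) l r).toNat : Nat) + 1
        = segMin (hv h) l r := by omega
    rw [h1']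
    calc segMin (hv h) l r * ((r : Int) - l + 1)
        ≤ segMin (hv h) l r *
          segMin (fun s => runv h rows s r) ((rows - segMin (hv h) l r).toNat) (rows.toNat - 1) :=
          mul_le_mul_of_nonneg_left hseg (by omega)
      _ = segMin (fun s => runv h rows s r) ((rows - segMin (hv h) l r).toNat) (rows.toNat - 1) *
          segMin (hv h) l r := mul_comm _ _

-- ===== VERDICT (by name: the statement is the Claim_ definition above) =====
theorem largestRectangleArea3_spec : Claim_equal_largestRectangleArea3 := by
  intro heights _
  unfold Spec_largestRectangleArea3
  by_cases hne : heights = []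
  · subst hne
    rfl
  · rw [A_eq_LA heights hne, B_eq_LB heights]
    have hub : ∀ c, c < heights.length →
        hv heights c ≤ (PySem.List.max? heights (fun x => x)).getD 0 := by
      intro c hc
      cases hm : PySem.List.max? heights (fun x => x) with
      | none => exact absurd ((PySem.List.max?_eq_none_iff heights (fun x => x)).mp hm) hne
      | some mv =>
        have := PySem.List.max?_isMax hm (hv heights c) (getD_mem 0 hc)
        simpa using this
    apply le_antisymm
    · rw [foldl_max_le_iff]
      exact ⟨le_foldl_max_self _ 0, LA_dom heights _⟩
    · rw [foldl_max_le_iff]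
      exact ⟨le_foldl_max_self _ 0, LB_dom heights _ hub⟩
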